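-- pv_equiv track=rewrite | github.com/MLWester/GridBoss | api/app/services/points.py | normalize_points_entries
-- ===== SOURCE A (Python) =====
-- from collections.abc import Iterable
--
-- def normalize_points_entries(entries: Iterable[tuple[int, int]]) -> list[tuple[int, int]]:
--     """Normalize user-provided point entries, ensuring sorted unique positions."""
--     seen: set[int] = set()
--     normalized: list[tuple[int, int]] = []
--     for position, points in entries:
--         if position in seen:
--             raise ValueError("Duplicate position in points map")
--         seen.add(position)
--         normalized.append((position, points))
--     normalized.sort(key=lambda item: item[0])
--     return normalized
-- ===== SOURCE B (Python) =====
-- def normalize_points_entries(entries):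
--     """Normalize user-provided point entries, ensuring sorted unique positions."""
--     normalized = sorted([(position, points) for position, points in entries],
--                         key=lambda item: item[0])
--     for prev, cur in zip(normalized, normalized[1:]):
--         if prev[0] == cur[0]:
--             raise ValueError("Duplicate position in points map")
--     return normalized
-- ===== Notes on version B (the rewrite author's own statement) =====
-- stated objective: alternative
-- what changed: B sorts the entries first and detects duplicate positions by scanning adjacent pairs of the sorted list, instead of A's seen-set membership check during a pre-sort accumulation loop.
import Mathlib
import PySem

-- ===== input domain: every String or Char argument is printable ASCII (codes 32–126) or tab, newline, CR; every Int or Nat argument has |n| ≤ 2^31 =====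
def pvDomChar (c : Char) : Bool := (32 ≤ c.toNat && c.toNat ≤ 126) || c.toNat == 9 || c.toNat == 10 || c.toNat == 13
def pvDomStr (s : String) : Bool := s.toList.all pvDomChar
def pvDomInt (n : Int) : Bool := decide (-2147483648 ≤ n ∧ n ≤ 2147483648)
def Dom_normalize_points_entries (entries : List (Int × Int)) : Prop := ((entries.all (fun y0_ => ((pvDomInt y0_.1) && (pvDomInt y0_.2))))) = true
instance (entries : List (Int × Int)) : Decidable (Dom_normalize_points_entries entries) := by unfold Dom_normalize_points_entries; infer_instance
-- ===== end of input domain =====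

-- B replaces A's seen-set duplicate check with a sort-first, adjacent-pair duplicate scan (objective: alternative; return values only — both raise ValueError on duplicate positions, excluded by Pre_).

-- ===== PORT A =====
-- the 'for position, points in entries' loop of A; on a duplicate position Python raises
-- ValueError (outside Pre_); the port returns [] there.
def npeLoop : List (Int × Int) → PySem.Set Int → List (Int × Int) → List (Int × Int)
  | [], _, normalized => normalized
  | (position, points) :: rest, seen, normalized =>
    if PySem.Set.contains seen position then []  -- raise ValueError("Duplicate position in points map")
    else npeLoop rest (PySem.Set.add seen position) (normalized ++ [(position, points)])

def normalize_points_entries (entries : List (Int × Int)) : List (Int × Int) :=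
  PySem.List.sorted (npeLoop entries PySem.Set.empty []) (fun item => item.1) false

-- ===== PORT B =====
-- the 'for prev, cur in zip(normalized, normalized[1:])' adjacent-duplicate scan of B
def npeAdjDup : List (Int × Int) → Bool
  | prev :: cur :: rest => prev.1 == cur.1 || npeAdjDup (cur :: rest)
  | _ => false

def normalize_points_entries_alt (entries : List (Int × Int)) : List (Int × Int) :=
  let normalized := PySem.List.sorted (entries.map (fun e => (e.1, e.2))) (fun item => item.1) false
  if npeAdjDup normalized then []  -- raise ValueError("Duplicate position in points map")
  else normalized

-- ===== PRECONDITION & SPEC =====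
-- Pre_ excludes exactly the inputs with a repeated position, on which A (and B) raise ValueError.
def Pre_normalize_points_entries (entries : List (Int × Int)) : Prop :=
  (entries.map Prod.fst).Nodup
instance (entries : List (Int × Int)) : Decidable (Pre_normalize_points_entries entries) := by
  unfold Pre_normalize_points_entries; infer_instance

def pvWitness_normalize_points_entries : (List (Int × Int)) := [(3, 10), (1, 25), (2, 18)]

def Spec_normalize_points_entries (entries : List (Int × Int)) (out : List (Int × Int)) : Prop := out = normalize_points_entries_alt entries
instance (entries : List (Int × Int)) (out : List (Int × Int)) : Decidable (Spec_normalize_points_entries entries out) := by unfold Spec_normalize_points_entries; infer_instance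

-- ===== CLAIM (what is proved, stated in full; the proofs are below) =====
def Claim_equal_normalize_points_entries : Prop := ∀ (entries : List (Int × Int)), Dom_normalize_points_entries entries → Pre_normalize_points_entries entries → Spec_normalize_points_entries entries (normalize_points_entries entries)

-- ===== LEMMAS AND PROOFS =====

-- A's loop just accumulates the entries when positions are fresh and pairwise distinct.
lemma npeLoop_eq (l : List (Int × Int)) (seen : PySem.Set Int) (norm : List (Int × Int))
    (hfresh : ∀ p ∈ l.map Prod.fst, p ∉ seen)
    (hnd : (l.map Prod.fst).Nodup) :
    npeLoop l seen norm = norm ++ l := by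
  induction l generalizing seen norm with
  | nil => simp [npeLoop]
  | cons hd tl ih =>
    obtain ⟨p, pts⟩ := hd
    simp only [List.map_cons, List.nodup_cons] at hnd
    have hp : p ∉ seen := hfresh p (by simp)
    have hc : PySem.Set.contains seen p = false := by
      simpa [PySem.Set.contains] using hp
    simp only [npeLoop, hc, Bool.false_eq_true, if_false]
    rw [ih]
    · simp
    · intro q hq
      have hq' : q ∈ tl.map Prod.fst := hq
      have : q ≠ p := fun h => hnd.1 (h ▸ hq')
      simpa [PySem.Set.mem_add, this] using fun h => (hfresh q (by simp [hq'])) h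
    · exact hnd.2

lemma npeAdjDup_eq_false (l : List (Int × Int)) (h : (l.map Prod.fst).Nodup) :
    npeAdjDup l = false := by
  induction l with
  | nil => simp [npeAdjDup]
  | cons a tl ih =>
    cases tl with
    | nil => simp [npeAdjDup]
    | cons b tl' =>
      simp only [List.map_cons, List.nodup_cons] at h
      have hne : a.1 ≠ b.1 := by
        intro he; exact h.1 (by simp [he])
      simp only [npeAdjDup, Bool.or_eq_false_iff]
      constructor
      · simpa using hne
      · exact ih (by simp only [List.map_cons, List.nodup_cons]; exact h.2)

lemma map_pair_eta (l : List (Int × Int)) : l.map (fun e => (e.1, e.2)) = l := by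
  induction l with
  | nil => rfl
  | cons a tl ih => simp [ih]

-- ===== VERDICT (by name: the statement is the Claim_ definition above) =====
theorem normalize_points_entries_spec : Claim_equal_normalize_points_entries := by
  intro entries _ hpre
  unfold Spec_normalize_points_entries normalize_points_entries normalize_points_entries_alt
  rw [map_pair_eta]
  have hloop : npeLoop entries PySem.Set.empty [] = entries := by
    simpa using npeLoop_eq entries PySem.Set.empty [] (by simp [PySem.Set.empty]) hpre
  rw [hloop]
  have hperm : (PySem.List.sorted entries (fun item => item.1) false).Perm entries :=
    PySem.List.sorted_perm ..
  have hnd : ((PySem.List.sorted entries (fun item => item.1) false).map Prod.fst).Nodup :=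
    ((hperm.map Prod.fst).nodup_iff).mpr hpre
  have hAdj := npeAdjDup_eq_false _ hnd
  simp only [hAdj, Bool.false_eq_true, if_false]
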